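-- pv_equiv track=rewrite | github.com/YunlongJiao/CodingPractice | math/string_to_integer.py | string_to_integer
-- ===== SOURCE A (Python) =====
-- def string_to_integer(str):
--     """
--     8. String to Integer (atoi)
--
--     Implement atoi which converts a string to an integer.
--     The function first discards as many whitespace characters as necessary,
--     until the first non-whitespace character is found. Then, starting from this character,
--     takes an optional initial plus or minus sign followed by as many numerical digits as possible,
--     and interprets them as a numerical value.
--
--     The string can contain additional characters after those that form the integral number,
--     which are ignored and have no effect on the behavior of this function.
--
--     If the first sequence of non-whitespace characters in str is not a valid integral number,
--     or if no such sequence exists because either str is empty or it contains only whitespace characters,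
--     no conversion is performed.
--
--     If no valid conversion could be performed, a zero value is returned.
--
--     Note:
--     Only the space character ' ' is considered as whitespace character. Assume we are dealing with an environment
--     which could only store integers within the 32-bit signed integer range: [−231,  231 − 1].
--     If the numerical value is out of the range of representable values, INT_MAX (231 − 1) or INT_MIN (−231) is returned.
--
--     https://leetcode.com/problems/string-to-integer-atoi/
--
--     """
--
--     i = 0
--     n = len(str)
--     while i < n and str[i] == ' ':
--         i += 1
--
--     num, sign = 0, 1
--     if i < n and str[i] == '-':
--         sign = -1
--         i += 1
--     elif i < n and str[i] == '+':
--         i += 1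
--
--     numbers = {'0','1','2','3','4','5','6','7','8','9'}
--     while i < n and str[i] in numbers:
--         num = num * 10 + int(str[i])
--         i += 1
--
--     return num * sign if -2147483648 <= num * sign <= 2147483647 else -2147483648 if sign == -1 else 2147483647
-- ===== SOURCE B (Python) =====
-- import re
--
-- def string_to_integer(str):
--     m = re.match(r' *([+-]?)([0-9]*)', str)
--     sign = -1 if m.group(1) == '-' else 1
--     digits = m.group(2)
--     num = int(digits) if digits else 0
--     val = num * sign
--     if -2147483648 <= val <= 2147483647:
--         return val
--     return -2147483648 if sign == -1 else 2147483647
-- ===== Notes on version B (the rewrite author's own statement) =====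
-- stated objective: idiomatic
-- what changed: Replaces A's three index-walking while loops (space skip, sign branch, digit accumulation against a set literal) with a single regex match capturing the leading spaces, optional sign and digit run in one go, converted with int() and clamped.
import Mathlib
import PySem

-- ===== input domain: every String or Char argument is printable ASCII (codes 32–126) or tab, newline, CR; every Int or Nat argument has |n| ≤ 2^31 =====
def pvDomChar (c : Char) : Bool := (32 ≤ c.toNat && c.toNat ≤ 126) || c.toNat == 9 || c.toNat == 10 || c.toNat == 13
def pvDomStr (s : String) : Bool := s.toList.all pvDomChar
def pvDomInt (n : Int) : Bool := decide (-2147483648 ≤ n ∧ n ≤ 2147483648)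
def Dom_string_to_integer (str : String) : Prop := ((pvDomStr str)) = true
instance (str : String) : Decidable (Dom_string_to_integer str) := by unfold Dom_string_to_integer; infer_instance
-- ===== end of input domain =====

-- B replaces A's three index-walking while loops with one regex match (ported by hand as
-- dropWhile / sign capture / takeWhile, exact for the regex ' *([+-]?)([0-9]*)'); objective: idiomatic.

-- ===== PORT A =====
-- while i < n and str[i] == ' ': i += 1   (forward index walk = structural recursion)
def pvA_skipSpaces : List Char → List Char
  | [] => []
  | c :: cs => if c = ' ' then pvA_skipSpaces cs else c :: cs

-- while i < n and str[i] in numbers: num = num * 10 + int(str[i]); i += 1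
-- int(str[i]) for a single digit character is exactly c.toNat - 48
def pvA_digits : List Char → Int → Int
  | [], num => num
  | c :: cs, num =>
      if c ∈ ['0','1','2','3','4','5','6','7','8','9'] then
        pvA_digits cs (num * 10 + ((c.toNat : Int) - 48))
      else num

def string_to_integer (str : String) : Int :=
  let rest := pvA_skipSpaces str.toList
  let p : Int × List Char :=
    match rest with
    | '-' :: cs => (-1, cs)
    | '+' :: cs => (1, cs)
    | cs => (1, cs)
  let num := pvA_digits p.2 0
  if -2147483648 ≤ num * p.1 ∧ num * p.1 ≤ 2147483647 then num * p.1
  else if p.1 = -1 then -2147483648 else 2147483647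

-- ===== PORT B =====
-- re.match(r' *([+-]?)([0-9]*)', str) ported by hand, exact for this regex:
-- group 1 = the optional sign character after the leading spaces, group 2 = the digit run after it;
-- int(digits) (0 for the empty group) ported as the standard base-10 fold.
def string_to_integer_alt (str : String) : Int :=
  let t := str.toList.dropWhile (fun c => c == ' ')
  let sign : Int := if t.head? = some '-' then -1 else 1
  let rest := if t.head? = some '-' || t.head? = some '+' then t.tail else t
  let digits := rest.takeWhile (fun c => 48 ≤ c.toNat && c.toNat ≤ 57)
  let num : Int := digits.foldl (fun a c => a * 10 + ((c.toNat : Int) - 48)) 0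
  let v := num * sign
  if -2147483648 ≤ v ∧ v ≤ 2147483647 then v
  else if sign = -1 then -2147483648 else 2147483647

-- ===== PRECONDITION & SPEC =====
def Spec_string_to_integer (str : String) (out : Int) : Prop := out = string_to_integer_alt str
instance (str : String) (out : Int) : Decidable (Spec_string_to_integer str out) := by unfold Spec_string_to_integer; infer_instance

-- ===== CLAIM (what is proved, stated in full; the proofs are below) =====
def Claim_equal_string_to_integer : Prop := ∀ (str : String), Dom_string_to_integer str → Spec_string_to_integer str (string_to_integer str)

-- ===== LEMMAS AND PROOFS =====
lemma pvSkip_eq_dropWhile (l : List Char) :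
    pvA_skipSpaces l = l.dropWhile (fun c => c == ' ') := by
  induction l with
  | nil => rfl
  | cons c cs ih =>
      by_cases h : c = ' '
      · simp [pvA_skipSpaces, List.dropWhile, h, ih]
      · have hb : (c == ' ') = false := by simp [h]
        simp [pvA_skipSpaces, List.dropWhile, hb, h]

lemma pvMem_digit (c : Char) :
    (c ∈ ['0','1','2','3','4','5','6','7','8','9']) ↔ (48 ≤ c.toNat ∧ c.toNat ≤ 57) := by
  constructor
  · intro h; fin_cases h <;> simp
  · rintro ⟨h1, h2⟩
    have hc : Char.ofNat c.toNat = c := Char.ofNat_toNat c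
    interval_cases h : c.toNat <;> simp_all <;> subst hc <;> decide

lemma pvDigits_eq_fold (l : List Char) (acc : Int) :
    pvA_digits l acc =
      (l.takeWhile (fun c => 48 ≤ c.toNat && c.toNat ≤ 57)).foldl
        (fun a c => a * 10 + ((c.toNat : Int) - 48)) acc := by
  induction l generalizing acc with
  | nil => rfl
  | cons c cs ih =>
      by_cases h : 48 ≤ c.toNat ∧ c.toNat ≤ 57
      · have hm : c ∈ ['0','1','2','3','4','5','6','7','8','9'] := (pvMem_digit c).2 h
        simp [pvA_digits, List.takeWhile, hm, h.1, h.2, ih]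
      · have hm : c ∉ ['0','1','2','3','4','5','6','7','8','9'] := fun hx => h ((pvMem_digit c).1 hx)
        have hb : (48 ≤ c.toNat && c.toNat ≤ 57) = false := by
          simp only [Bool.and_eq_false_iff, decide_eq_false_iff_not]
          omega
        simp [pvA_digits, List.takeWhile, hm, hb]

-- ===== VERDICT (by name: the statement is the Claim_ definition above) =====
theorem string_to_integer_spec : Claim_equal_string_to_integer := by
  intro str _
  unfold Spec_string_to_integer string_to_integer string_to_integer_alt
  rw [pvSkip_eq_dropWhile]
  rcases h : str.toList.dropWhile (fun c => c == ' ') with _ | ⟨c, cs⟩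
  · simp [pvDigits_eq_fold]
  · by_cases hminus : c = '-'
    · subst hminus; simp [pvDigits_eq_fold]
    · by_cases hplus : c = '+'
      · subst hplus; simp [pvDigits_eq_fold]
      · simp only [List.head?_cons, List.tail_cons]
        have h1 : (some c = some '-') = False := by simp [hminus]
        have h2 : (some c = some '+') = False := by simp [hplus]
        cases c with
        | mk v hv =>
          simp [pvDigits_eq_fold, h1, h2, hminus, hplus]
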